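-- pv_equiv track=rewrite | github.com/Hard2290/RecipeFinder-App-GENAI | backend/server.py | has_onion_garlic
-- ===== SOURCE A (Python) =====
-- from typing import List, Dict, Any, Optional
--
-- def has_onion_garlic(ingredients: List[str]) -> bool:
--     """Check if recipe contains onion/garlic ingredients"""
--     onion_garlic_keywords = [
--         'onion', 'onions', 'garlic', 'garlics', 'shallot', 'shallots',
--         'leek', 'leeks', 'scallion', 'scallions', 'chive', 'chives',
--         'spring onion', 'green onion', 'pearl onion', 'red onion',
--         'white onion', 'yellow onion', 'garlic powder', 'onion powder',
--         'garlic paste', 'garlic clove', 'minced garlic'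
--     ]
--
--     for ingredient in ingredients:
--         ingredient_lower = ingredient.lower()
--         for keyword in onion_garlic_keywords:
--             if keyword in ingredient_lower:
--                 return True
--     return False
-- ===== SOURCE B (Python) =====
-- def has_onion_garlic(ingredients):
--     """Check if recipe contains onion/garlic ingredients.
--
--     Single left-to-right scan of each lowered ingredient with a first-letter
--     dispatch table over the 6 minimal keywords (every keyword of the original
--     23 contains one of these as a substring)."""
--     table = {
--         'o': ('onion',),
--         'g': ('garlic',),
--         's': ('shallot', 'scallion'),
--         'l': ('leek',),
--         'c': ('chive',),
--     }
--     for ingredient in ingredients: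
--         s = ingredient.lower()
--         for i, ch in enumerate(s):
--             for k in table.get(ch, ()):
--                 if s.startswith(k, i):
--                     return True
--     return False
-- ===== Notes on version B (the rewrite author's own statement) =====
-- stated objective: alternative
-- what changed: B replaces the 23-keyword inner substring-search loop by a single left-to-right scan of each lowered ingredient that at each position dispatches on the current character through a first-letter table of the 6 minimal keywords (onion, garlic, shallot, leek, scallion, chive), proved to cover all 23.
import Mathlib
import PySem

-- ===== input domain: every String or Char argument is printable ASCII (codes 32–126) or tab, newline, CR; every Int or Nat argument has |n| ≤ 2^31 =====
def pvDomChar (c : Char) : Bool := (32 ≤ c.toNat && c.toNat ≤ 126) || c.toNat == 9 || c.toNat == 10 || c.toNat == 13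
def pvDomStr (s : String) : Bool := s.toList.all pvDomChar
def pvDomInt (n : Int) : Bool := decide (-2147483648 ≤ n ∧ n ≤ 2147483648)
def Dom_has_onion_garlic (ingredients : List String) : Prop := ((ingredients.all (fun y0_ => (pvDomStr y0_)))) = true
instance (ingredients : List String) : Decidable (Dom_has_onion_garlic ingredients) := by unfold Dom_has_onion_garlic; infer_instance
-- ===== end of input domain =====

-- B replaces A's 23-keyword inner substring loop by a single scan of each lowered
-- ingredient with a first-letter dispatch over the 6 minimal keywords (alternative algorithm).


-- ===== PORT A =====
def pvKeywords : List String :=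
  ["onion", "onions", "garlic", "garlics", "shallot", "shallots",
   "leek", "leeks", "scallion", "scallions", "chive", "chives",
   "spring onion", "green onion", "pearl onion", "red onion",
   "white onion", "yellow onion", "garlic powder", "onion powder",
   "garlic paste", "garlic clove", "minced garlic"]

def has_onion_garlic (ingredients : List String) : Bool :=
  ingredients.any (fun ingredient =>
    let ingredient_lower := PySem.Str.lower ingredient
    pvKeywords.any (fun keyword => PySem.Str.isIn keyword ingredient_lower))

-- ===== PORT B =====
-- Source B's first-letter dispatch table (a Python dict → association list)
def pvTable : PySem.Dict Char (List String) :=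
  PySem.Dict.ofList
    [('o', ["onion"]), ('g', ["garlic"]), ('s', ["shallot", "scallion"]),
     ('l', ["leek"]), ('c', ["chive"])]

-- Source B's inner position loop: 'for i, ch in enumerate(s)' with 's.startswith(k, i)';
-- the suffix 'c :: rest' is s[i:], so startswith(k, i) is k.isPrefixOf (c :: rest)
def pvScanHit : List Char → Bool
  | [] => false
  | c :: rest =>
      ((PySem.Dict.getD pvTable c []).any (fun k => k.toList.isPrefixOf (c :: rest)))
        || pvScanHit rest

def has_onion_garlic_alt (ingredients : List String) : Bool :=
  ingredients.any (fun ingredient => pvScanHit (PySem.Str.lower ingredient).toList)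

-- ===== PRECONDITION & SPEC =====
def Spec_has_onion_garlic (ingredients : List String) (out : Bool) : Prop := out = has_onion_garlic_alt ingredients
instance (ingredients : List String) (out : Bool) : Decidable (Spec_has_onion_garlic ingredients out) := by unfold Spec_has_onion_garlic; infer_instance

-- ===== CLAIM (what is proved, stated in full; the proofs are below) =====
def Claim_equal_has_onion_garlic : Prop := ∀ (ingredients : List String), Dom_has_onion_garlic ingredients → Spec_has_onion_garlic ingredients (has_onion_garlic ingredients)

-- ===== LEMMAS AND PROOFS =====

-- the 6 minimal keywords, as the flat list Source B's table dispatches over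
def pvBase : List (List Char) :=
  ["onion".toList, "garlic".toList, "shallot".toList, "leek".toList,
   "scallion".toList, "chive".toList]

-- every one of A's 23 keywords contains one of the 6 base keywords as a substring
theorem pv_key_reduce : ∀ k ∈ pvKeywords, ∃ b ∈ pvBase, b <:+: k.toList := by decide

-- each base keyword is itself one of A's 23 keywords
theorem pv_base_sub : ∀ b ∈ pvBase, ∃ k ∈ pvKeywords, k.toList = b := by decide

-- the first-letter dispatch at a position tests exactly the 6 base keywords there
theorem pv_dispatch_eq (c : Char) (rest : List Char) :
    ((PySem.Dict.getD pvTable c []).any (fun k => k.toList.isPrefixOf (c :: rest)))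
      = pvBase.any (fun b => b.isPrefixOf (c :: rest)) := by
  by_cases ho : c = 'o'
  · subst ho
    rw [show PySem.Dict.getD pvTable 'o' [] = ["onion"] from rfl]
    simp [pvBase, List.isPrefixOf]
  by_cases hg : c = 'g'
  · subst hg
    rw [show PySem.Dict.getD pvTable 'g' [] = ["garlic"] from rfl]
    simp [pvBase, List.isPrefixOf]
  by_cases hs : c = 's'
  · subst hs
    rw [show PySem.Dict.getD pvTable 's' [] = ["shallot", "scallion"] from rfl]
    simp [pvBase, List.isPrefixOf]
  by_cases hl : c = 'l'
  · subst hl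
    rw [show PySem.Dict.getD pvTable 'l' [] = ["leek"] from rfl]
    simp [pvBase, List.isPrefixOf]
  by_cases hc : c = 'c'
  · subst hc
    rw [show PySem.Dict.getD pvTable 'c' [] = ["chive"] from rfl]
    simp [pvBase, List.isPrefixOf]
  · have hd : PySem.Dict.getD pvTable c [] = [] := by
      rw [PySem.Dict.getD_eq_get?_getD]
      have hmk : pvTable = PySem.Dict.mk
          [('o', ["onion"]), ('g', ["garlic"]), ('s', ["shallot", "scallion"]),
           ('l', ["leek"]), ('c', ["chive"])] := rfl
      have : PySem.Dict.get? pvTable c = none := by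
        rw [hmk]
        simp [PySem.Dict.get?_mk_cons,
          Ne.symm ho, Ne.symm hg, Ne.symm hs, Ne.symm hl, Ne.symm hc]
        rfl
      rw [this]; rfl
    rw [hd]
    simp [pvBase, List.isPrefixOf, Ne.symm ho, Ne.symm hg, Ne.symm hs, Ne.symm hl, Ne.symm hc]

-- the scan finds exactly the suffixes at which a base keyword starts
theorem pv_scanHit_iff (cs : List Char) :
    pvScanHit cs = true ↔ ∃ b ∈ pvBase, b <:+: cs := by
  induction cs with
  | nil =>
      simp only [pvScanHit]
      constructor
      · intro h; exact absurd h (by decide)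
      · rintro ⟨b, hb, hinf⟩
        rw [List.infix_nil] at hinf
        subst hinf
        exact absurd hb (by decide)
  | cons c rest ih =>
      rw [pvScanHit, pv_dispatch_eq, Bool.or_eq_true, ih, List.any_eq_true]
      simp only [List.isPrefixOf_iff_prefix]
      constructor
      · rintro (⟨b, hb, h⟩ | ⟨b, hb, h⟩)
        · exact ⟨b, hb, h.isInfix⟩
        · exact ⟨b, hb, List.infix_cons h⟩
      · rintro ⟨b, hb, h⟩
        rcases (List.infix_cons_iff).mp h with h | h
        · exact Or.inl ⟨b, hb, h⟩
        · exact Or.inr ⟨b, hb, h⟩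

-- per-ingredient agreement: A's 23-keyword membership test = B's dispatch scan
theorem pv_elem_eq (s : String) :
    pvKeywords.any (fun keyword => PySem.Str.isIn keyword s) = pvScanHit s.toList := by
  rw [Bool.eq_iff_iff, List.any_eq_true, pv_scanHit_iff]
  constructor
  · rintro ⟨k, hk, hin⟩
    rw [PySem.Str.isIn_iff_infix] at hin
    obtain ⟨b, hb, hbk⟩ := pv_key_reduce k hk
    exact ⟨b, hb, hbk.trans hin⟩
  · rintro ⟨b, hb, hbs⟩
    obtain ⟨k, hk, hkb⟩ := pv_base_sub b hb
    exact ⟨k, hk, (PySem.Str.isIn_iff_infix _ _).mpr (hkb ▸ hbs)⟩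

-- ===== VERDICT (by name: the statement is the Claim_ definition above) =====
theorem has_onion_garlic_spec : Claim_equal_has_onion_garlic := by
  intro ingredients _
  unfold Spec_has_onion_garlic has_onion_garlic has_onion_garlic_alt
  exact PySem.List.any_congr_mem (fun x _ => pv_elem_eq (PySem.Str.lower x))
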